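-- pv_equiv track=rewrite | github.com/fivetaku/insane-design | skills/insane-design/scripts/brand_candidates.py | _pick_role
-- ===== SOURCE A (Python) =====
-- def _pick_role(name: str) -> str:
--     best: tuple[int, int, str] | None = None
--     lowered = name.lower()
--     for order, keyword in enumerate(("brand", "primary", "accent", "action", "cta")):
--         index = lowered.find(keyword)
--         if index == -1:
--             continue
--         candidate = (index, order, keyword)
--         if best is None or candidate < best:
--             best = candidate
--     return "" if best is None else best[2]
-- ===== SOURCE B (Python) =====
-- def _pick_role(name: str) -> str:
--     lowered = name.lower()
--     for i in range(len(lowered)):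
--         for keyword in ("brand", "primary", "accent", "action", "cta"):
--             if lowered.startswith(keyword, i):
--                 return keyword
--     return ""
-- ===== Notes on version B (the rewrite author's own statement) =====
-- stated objective: alternative
-- what changed: B finds the earliest match by a single left-to-right positional scan (startswith at each index, keywords tried in order), replacing A's five separate .find() scans with (index, order) min-tracking.
import Mathlib
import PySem

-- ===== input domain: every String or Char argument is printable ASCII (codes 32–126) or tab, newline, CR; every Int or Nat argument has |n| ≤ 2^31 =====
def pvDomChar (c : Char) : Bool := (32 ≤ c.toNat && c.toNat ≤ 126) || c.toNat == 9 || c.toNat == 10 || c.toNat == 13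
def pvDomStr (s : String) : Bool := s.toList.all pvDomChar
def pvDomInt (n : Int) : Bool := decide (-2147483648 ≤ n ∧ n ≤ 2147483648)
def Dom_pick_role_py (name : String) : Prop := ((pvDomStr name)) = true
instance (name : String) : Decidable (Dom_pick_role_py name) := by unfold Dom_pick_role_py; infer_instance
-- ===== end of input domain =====

-- B replaces A's five separate .find() scans plus (index, order) min-tracking by a single
-- left-to-right positional scan that tries the keywords in order at each index (alternative
-- decomposition, same exact result; no speed claim).

def pvKeywords : List String := ["brand", "primary", "accent", "action", "cta"]

-- ===== PORT A =====
-- Python tuple '<' on (int, int, str), as A's 'candidate < best' uses it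
def pvTupLt (a b : Int × Int × String) : Bool :=
  decide (a.1 < b.1) ||
    (a.1 == b.1 && (decide (a.2.1 < b.2.1) || (a.2.1 == b.2.1 && decide (a.2.2 < b.2.2))))

-- one iteration of A's loop body
def pvAStep (lowered : String) (best : Option (Int × Int × String)) (ok : Int × String) :
    Option (Int × Int × String) :=
  let index := PySem.Str.find lowered ok.2
  if index = -1 then best
  else
    let candidate := (index, ok.1, ok.2)
    match best with
    | none => some candidate
    | some b => if pvTupLt candidate b then some candidate else best

def pick_role_py (name : String) : String :=
  let lowered := PySem.Str.lower name
  match (PySem.List.enumerate pvKeywords).foldl (pvAStep lowered) none with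
  | none => ""
  | some b => b.2.2

-- ===== PORT B =====
-- inner loop of B: first keyword (in order) matching at the current position;
-- 'lowered.startswith(keyword, i)' is Chars.startswith on the i-th suffix (exact)
def pvBGo : List Char → String
  | [] => ""
  | c :: rest =>
    match pvKeywords.find? (fun k => PySem.Chars.startswith (c :: rest) k.toList) with
    | some k => k
    | none => pvBGo rest

def pick_role_py_alt (name : String) : String :=
  pvBGo (PySem.Str.lower name).toList

-- ===== PRECONDITION & SPEC =====
def Spec_pick_role_py (name : String) (out : String) : Prop := out = pick_role_py_alt name
instance (name : String) (out : String) : Decidable (Spec_pick_role_py name out) := by unfold Spec_pick_role_py; infer_instance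

-- ===== CLAIM (what is proved, stated in full; the proofs are below) =====
def Claim_equal_pick_role_py : Prop := ∀ (name : String), Dom_pick_role_py name → Spec_pick_role_py name (pick_role_py name)

-- ===== LEMMAS AND PROOFS =====

-- A's step on the char-list side (Str.find bridged to Chars.find)
def pvAStepC (L : List Char) (best : Option (Int × Int × String)) (ok : Int × String) :
    Option (Int × Int × String) :=
  let index := PySem.Chars.find L ok.2.toList
  if index = -1 then best
  else
    let candidate := (index, ok.1, ok.2)
    match best with
    | none => some candidate
    | some b => if pvTupLt candidate b then some candidate else best

theorem pvAStep_eq (lowered : String) :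
    pvAStep lowered = pvAStepC lowered.toList := by
  funext best ok
  simp [pvAStep, pvAStepC, PySem.Str.find_eq]

def pvAcore (L : List Char) : String :=
  match (PySem.List.enumerate pvKeywords).foldl (pvAStepC L) none with
  | none => ""
  | some b => b.2.2

def pvShift (o : Option (Int × Int × String)) : Option (Int × Int × String) :=
  o.map (fun t => (t.1 + 1, t.2))

theorem pvTupLt_shift (a b : Int × Int × String) :
    pvTupLt (a.1 + 1, a.2) (b.1 + 1, b.2) = pvTupLt a b := by
  rcases a with ⟨i, o, k⟩; rcases b with ⟨j, q, l⟩
  rw [Bool.eq_iff_iff]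
  simp only [pvTupLt, Bool.or_eq_true, Bool.and_eq_true, decide_eq_true_eq, beq_iff_eq]
  constructor
  · rintro (h | ⟨h, rest⟩)
    · exact Or.inl (by omega)
    · exact Or.inr ⟨by omega, rest⟩
  · rintro (h | ⟨h, rest⟩)
    · exact Or.inl (by omega)
    · exact Or.inr ⟨by omega, rest⟩

theorem pv_find_zero_of_prefix {k L : List Char} (h : k <+: L) :
    PySem.Chars.find L k = 0 := by
  have hnn : 0 ≤ PySem.Chars.find L k := (PySem.Chars.find_nonneg_iff L k).mpr h.isInfix
  obtain ⟨hpre, hmin⟩ := PySem.Chars.find_spec hnn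
  by_contra hne
  have hpos : 0 < (PySem.Chars.find L k).toNat := by omega
  exact hmin 0 hpos (by simpa using h)

theorem pv_find_cons_of_not_prefix {k : List Char} {c : Char} {L : List Char}
    (h : ¬ k <+: (c :: L)) :
    PySem.Chars.find (c :: L) k =
      if PySem.Chars.find L k = -1 then -1 else PySem.Chars.find L k + 1 := by
  by_cases hin : k <:+: (c :: L)
  · have htail : k <:+: L := by
      rcases (List.infix_cons_iff).mp hin with hp | ht
      · exact absurd hp h
      · exact ht
    have hL : 0 ≤ PySem.Chars.find L k := (PySem.Chars.find_nonneg_iff L k).mpr htail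
    have hC : 0 ≤ PySem.Chars.find (c :: L) k := (PySem.Chars.find_nonneg_iff _ k).mpr hin
    obtain ⟨hpreL, hminL⟩ := PySem.Chars.find_spec hL
    obtain ⟨hpreC, hminC⟩ := PySem.Chars.find_spec hC
    set fC := (PySem.Chars.find (c :: L) k).toNat with hfC
    set fL := (PySem.Chars.find L k).toNat with hfL
    have hfC0 : fC ≠ 0 := by
      intro h0
      apply h
      simpa [h0] using hpreC
    obtain ⟨m, hm⟩ : ∃ m, fC = m + 1 := ⟨fC - 1, by omega⟩
    -- prefix at (c::L).drop fC = L.drop m, so fL ≤ m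
    have hpm : k <+: L.drop m := by
      have := hpreC; rw [hm] at this; simpa using this
    have h1 : ¬ (m < fL) := fun hlt => hminL m hlt hpm
    -- prefix at L.drop fL = (c::L).drop (fL+1), so fC ≤ fL+1
    have h2 : ¬ (fL + 1 < fC) := by
      intro hlt
      exact hminC (fL + 1) hlt (by simpa using hpreL)
    have : fC = fL + 1 := by omega
    have hne : PySem.Chars.find L k ≠ -1 := by omega
    simp only [hne, if_false]
    omega
  · have h1 : PySem.Chars.find (c :: L) k = -1 :=
      (PySem.Chars.find_eq_neg_one_iff _ k).mpr hin
    have h2 : PySem.Chars.find L k = -1 :=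
      (PySem.Chars.find_eq_neg_one_iff _ k).mpr
        (fun ht => hin ((List.infix_cons_iff).mpr (Or.inr ht)))
    simp [h1, h2]

-- no keyword matches at position 0: A's fold over the longer string is the shifted fold over the tail
theorem pv_fold_shift (ps : List (Int × String)) (c : Char) (L : List Char)
    (h : ∀ p ∈ ps, ¬ p.2.toList <+: (c :: L)) (acc : Option (Int × Int × String)) :
    ps.foldl (pvAStepC (c :: L)) (pvShift acc) = pvShift (ps.foldl (pvAStepC L) acc) := by
  induction ps generalizing acc with
  | nil => simp
  | cons p ps ih =>
    have hp := h p (List.mem_cons_self)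
    have hstep : pvAStepC (c :: L) (pvShift acc) p = pvShift (pvAStepC L acc p) := by
      rw [pvAStepC, pvAStepC, pv_find_cons_of_not_prefix hp]
      by_cases hf : PySem.Chars.find L p.2.toList = -1
      · simp [hf]
      · have hge : 0 ≤ PySem.Chars.find L p.2.toList := by
          have := PySem.Chars.neg_one_le_find L p.2.toList; omega
        have hne : PySem.Chars.find L p.2.toList + 1 ≠ -1 := by omega
        simp only [hf, if_false, hne]
        cases acc with
        | none => simp [pvShift]
        | some b =>
          simp only [pvShift, Option.map_some]
          have := pvTupLt_shift (PySem.Chars.find L p.2.toList, p.1, p.2) b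
          simp only at this
          rw [this]
          by_cases hlt : pvTupLt (PySem.Chars.find L p.2.toList, p.1, p.2) b = true
          · simp [hlt]
          · simp [Bool.eq_false_iff.mpr hlt]
    rw [List.foldl_cons, List.foldl_cons, hstep, ih (fun q hq => h q (List.mem_cons_of_mem _ hq))]

-- once the fold holds a candidate no later candidate beats, it keeps it
theorem pv_fold_absorb (ps : List (Int × String)) (L : List Char) (x : Int × Int × String)
    (h : ∀ p ∈ ps, PySem.Chars.find L p.2.toList ≠ -1 →
        pvTupLt (PySem.Chars.find L p.2.toList, p.1, p.2) x = false) :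
    ps.foldl (pvAStepC L) (some x) = some x := by
  induction ps with
  | nil => rfl
  | cons p ps ih =>
    rw [List.foldl_cons]
    have hstep : pvAStepC L (some x) p = some x := by
      rw [pvAStepC]
      by_cases hf : PySem.Chars.find L p.2.toList = -1
      · simp [hf]
      · simp [hf, h p (List.mem_cons_self) hf]
    rw [hstep]
    exact ih (fun q hq => h q (List.mem_cons_of_mem _ hq))

-- before x's keyword is reached, the accumulator (if any) is still beaten by x
theorem pv_fold_pre (ps : List (Int × String)) (L : List Char) (x : Int × Int × String)
    (h : ∀ p ∈ ps, PySem.Chars.find L p.2.toList ≠ -1 →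
        pvTupLt x (PySem.Chars.find L p.2.toList, p.1, p.2) = true)
    (acc : Option (Int × Int × String))
    (hacc : acc = none ∨ ∃ y, acc = some y ∧ pvTupLt x y = true) :
    ps.foldl (pvAStepC L) acc = none ∨
      ∃ y, ps.foldl (pvAStepC L) acc = some y ∧ pvTupLt x y = true := by
  induction ps generalizing acc with
  | nil => simpa using hacc
  | cons p ps ih =>
    rw [List.foldl_cons]
    apply ih (fun q hq => h q (List.mem_cons_of_mem _ hq))
    rw [pvAStepC]
    by_cases hf : PySem.Chars.find L p.2.toList = -1
    · simpa [hf] using hacc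
    · have hx := h p (List.mem_cons_self) hf
      rcases hacc with rfl | ⟨y, rfl, hy⟩
      · exact Or.inr ⟨_, by simp [hf], hx⟩
      · simp only [hf, if_false]
        by_cases hlt : pvTupLt (PySem.Chars.find L p.2.toList, p.1, p.2) y = true
        · exact Or.inr ⟨_, by simp [hlt], hx⟩
        · exact Or.inr ⟨y, by simp [Bool.eq_false_iff.mpr hlt], hy⟩

theorem pvTupLt_zero_lt {f o oa : Int} {k ka : String} (hf : 0 < f) :
    pvTupLt (0, oa, ka) (f, o, k) = true := by
  simp only [pvTupLt, Bool.or_eq_true, decide_eq_true_eq]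
  exact Or.inl hf

theorem pvTupLt_ge_false {f o oa : Int} {k ka : String} (hf : 0 ≤ f) (ho : oa < o) :
    pvTupLt (f, o, k) (0, oa, ka) = false := by
  rw [Bool.eq_false_iff]
  simp only [ne_eq, pvTupLt, Bool.or_eq_true, Bool.and_eq_true, decide_eq_true_eq, beq_iff_eq,
    not_or, not_and]
  constructor
  · omega
  · intro hf0
    constructor
    · omega
    · intro heq; omega

-- main equivalence on the char-list level
theorem pv_core_eq (L : List Char) : pvAcore L = pvBGo L := by
  induction L with
  | nil =>
    have hnone : (PySem.List.enumerate pvKeywords).foldl (pvAStepC []) none = none := by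
      decide
    simp [pvAcore, hnone, pvBGo]
  | cons c rest ih =>
    by_cases hex : ∃ k, pvKeywords.find? (fun k => PySem.Chars.startswith (c :: rest) k.toList) = some k
    · -- some keyword matches at position 0; B returns the first such keyword k*
      obtain ⟨kstar, hfind⟩ := hex
      obtain ⟨hpred, as, bs, hsplit, hbefore⟩ := List.find?_eq_some_iff_append.mp hfind
      have hkpre : kstar.toList <+: (c :: rest) := (PySem.Chars.startswith_iff _ _).mp hpred
      have hfind0 : PySem.Chars.find (c :: rest) kstar.toList = 0 := pv_find_zero_of_prefix hkpre
      -- decompose A's fold along the split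
      have henum : PySem.List.enumerate pvKeywords =
          PySem.List.enumerate as 0 ++
            ((as.length : Int), kstar) :: PySem.List.enumerate bs ((as.length : Int) + 1) := by
        rw [show PySem.List.enumerate pvKeywords = PySem.List.enumerate pvKeywords 0 from rfl,
          hsplit, PySem.List.enumerate_append, PySem.List.enumerate_cons]
        norm_num
      -- phase 1: keywords before k* never match at 0, their finds are ≥ 1
      have hpre1 : ∀ p ∈ PySem.List.enumerate as 0,
          PySem.Chars.find (c :: rest) p.2.toList ≠ -1 →
          pvTupLt (0, (as.length : Int), kstar)
            (PySem.Chars.find (c :: rest) p.2.toList, p.1, p.2) = true := by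
        intro p hp hne
        obtain ⟨j, hj, rfl⟩ := (PySem.List.mem_enumerate_iff _ _ _).mp hp
        simp only at hne ⊢
        have hnotpre : ¬ as[j].toList <+: (c :: rest) := by
          intro hpre
          have := hbefore as[j] (List.getElem_mem hj)
          rw [(PySem.Chars.startswith_iff _ _).mpr hpre] at this
          simp at this
        have hge : 0 ≤ PySem.Chars.find (c :: rest) as[j].toList := by
          have := PySem.Chars.neg_one_le_find (c :: rest) as[j].toList; omega
        have hne0 : PySem.Chars.find (c :: rest) as[j].toList ≠ 0 := by
          intro h0
          obtain ⟨hpre', _⟩ := PySem.Chars.find_spec hge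
          rw [h0] at hpre'
          exact hnotpre (by simpa using hpre')
        exact pvTupLt_zero_lt (by omega)
      have hphase1 := pv_fold_pre (PySem.List.enumerate as 0) (c :: rest)
        (0, (as.length : Int), kstar) hpre1 none (Or.inl rfl)
      -- phase 2: the step at k* installs x
      have hstep2 : pvAStepC (c :: rest)
          ((PySem.List.enumerate as 0).foldl (pvAStepC (c :: rest)) none)
          ((as.length : Int), kstar) = some (0, (as.length : Int), kstar) := by
        rcases hphase1 with hnone | ⟨y, hy, hlty⟩
        · rw [hnone, pvAStepC]
          simp [hfind0]
        · rw [hy, pvAStepC]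
          simp only [hfind0]
          norm_num
          simp [hlty]
      -- phase 3: keywords after k* never beat x
      have habs : ∀ p ∈ PySem.List.enumerate bs ((as.length : Int) + 1),
          PySem.Chars.find (c :: rest) p.2.toList ≠ -1 →
          pvTupLt (PySem.Chars.find (c :: rest) p.2.toList, p.1, p.2)
            (0, (as.length : Int), kstar) = false := by
        intro p hp hne
        obtain ⟨j, hj, rfl⟩ := (PySem.List.mem_enumerate_iff _ _ _).mp hp
        simp only at hne ⊢
        have hge : 0 ≤ PySem.Chars.find (c :: rest) bs[j].toList := by
          have := PySem.Chars.neg_one_le_find (c :: rest) bs[j].toList; omega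
        exact pvTupLt_ge_false hge (by omega)
      have hfold : (PySem.List.enumerate pvKeywords).foldl (pvAStepC (c :: rest)) none =
          some (0, (as.length : Int), kstar) := by
        rw [henum, List.foldl_append, List.foldl_cons, hstep2]
        exact pv_fold_absorb _ _ _ habs
      simp [pvAcore, hfold, pvBGo, hfind]
    · -- no keyword matches at position 0
      have hnone : pvKeywords.find? (fun k => PySem.Chars.startswith (c :: rest) k.toList) = none := by
        cases hf : pvKeywords.find? (fun k => PySem.Chars.startswith (c :: rest) k.toList) with
        | none => rfl
        | some k => exact absurd ⟨k, hf⟩ hex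
      have hnopre : ∀ p ∈ PySem.List.enumerate pvKeywords, ¬ p.2.toList <+: (c :: rest) := by
        intro p hp hpre
        obtain ⟨j, hj, rfl⟩ := (PySem.List.mem_enumerate_iff _ _ _).mp hp
        simp only at hpre
        have hmem : pvKeywords[j] ∈ pvKeywords := List.getElem_mem hj
        have := List.find?_eq_none.mp hnone pvKeywords[j] hmem
        rw [(PySem.Chars.startswith_iff _ _).mpr hpre] at this
        simp at this
      have hshift := pv_fold_shift (PySem.List.enumerate pvKeywords) c rest hnopre none
      have hshift' : (PySem.List.enumerate pvKeywords).foldl (pvAStepC (c :: rest)) none =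
          pvShift ((PySem.List.enumerate pvKeywords).foldl (pvAStepC rest) none) := by
        simpa [pvShift] using hshift
      have hA : pvAcore (c :: rest) = pvAcore rest := by
        rw [pvAcore, pvAcore, hshift']
        cases (PySem.List.enumerate pvKeywords).foldl (pvAStepC rest) none with
        | none => rfl
        | some b => rfl
      rw [hA, ih, pvBGo, hnone]

-- ===== VERDICT (by name: the statement is the Claim_ definition above) =====
theorem pick_role_py_spec : Claim_equal_pick_role_py := by
  intro name _
  show pick_role_py name = pick_role_py_alt name
  rw [pick_role_py, pick_role_py_alt]
  simp only [pvAStep_eq]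
  exact pv_core_eq (PySem.Str.lower name).toList
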